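-- pv_equiv track=rewrite | github.com/DewPeaceTigers/AlgorithmStudy | weeks/week_45/PG_42627/yeri.py | solution
-- ===== SOURCE A (Python) =====
-- import heapq
--
-- def solution(jobs):
--     answer = 0
--     jobs.sort()
--     cands = []
--     done = 0
--     idx = 0
--     end =0
--     while done< len(jobs):
--         for i in range(idx,len(jobs)):
--             if jobs[i][0] <= end:
--                 heapq.heappush(cands,[jobs[i][1],jobs[i][0]])
--                 idx+=1
--             else: break
--         if not cands:
--             end = jobs[idx][0]
--             continue
--         l,a = heapq.heappop(cands)
--         answer += end+l-a
--         end += l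
--         done+=1
--     return answer//len(jobs)
-- ===== SOURCE B (Python) =====
-- def insort(job, pending):
--     k = 0
--     while k < len(pending) and pending[k] <= job:
--         k += 1
--     return pending[:k] + [job] + pending[k:]
--
-- def solution(jobs):
--     jobs.sort()
--     n = len(jobs)
--     finishes = []   # phase 1: (finish_time, arrival) of each served job, in service order
--     pending = []    # available jobs as (length, arrival) pairs, kept sorted ascending
--     i = 0
--     end = 0
--     while len(finishes) < n:
--         while i < n and jobs[i][0] <= end:
--             pending = insort((jobs[i][1], jobs[i][0]), pending)
--             i += 1
--         if pending:
--             l, a = pending[0]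
--             pending = pending[1:]
--             end += l
--             finishes.append((end, a))
--         else:
--             end = jobs[i][0]
--     total = 0       # phase 2: sum the waits finish - arrival
--     for f, a in finishes:
--         total += f - a
--     return total // n
-- ===== Notes on version B (the rewrite author's own statement) =====
-- stated objective: alternative
-- what changed: Replaced the min-heap with an ordered pending list maintained by a hand-written sorted insertion and popped at the front, and split the computation into two passes: the scheduling loop now only records (finish, arrival) pairs and a separate second pass sums the waits.
import Mathlib
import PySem

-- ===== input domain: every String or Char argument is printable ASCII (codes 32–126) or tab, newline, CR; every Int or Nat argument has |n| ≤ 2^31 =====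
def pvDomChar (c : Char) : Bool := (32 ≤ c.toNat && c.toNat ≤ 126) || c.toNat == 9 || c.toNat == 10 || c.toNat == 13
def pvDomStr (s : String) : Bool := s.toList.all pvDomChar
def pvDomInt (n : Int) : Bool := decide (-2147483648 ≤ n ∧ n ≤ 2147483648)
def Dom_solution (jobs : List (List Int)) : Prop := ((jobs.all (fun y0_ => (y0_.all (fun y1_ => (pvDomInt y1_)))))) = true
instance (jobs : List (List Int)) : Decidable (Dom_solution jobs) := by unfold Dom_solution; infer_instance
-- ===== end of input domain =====

-- B replaces A's min-heap by an ordered pending list maintained by a hand-written sorted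
-- insertion and popped at the front, and splits the work into two passes: the scheduling
-- loop only records (finish, arrival) pairs, a second pass sums the waits (objective:
-- alternative). Both Pythons sort `jobs` in place; the equivalence proved here is about the
-- RETURN value (the ports are pure and both sort the same list, so the mutation is identical).
-- Loops are ported with a fuel argument that provably never runs out: a totality guard only.

-- ===== PORT A =====
-- jobs[i][0] / jobs[i][1]; the defaults are only reached where Python raises IndexError,
-- which Pre_solution excludes.
def jobArr (js : List (List Int)) (i : Nat) : Int := PySem.List.pyGetD (js.getD i []) 0 0
def jobLen (js : List (List Int)) (i : Nat) : Int := PySem.List.pyGetD (js.getD i []) 1 0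

-- the inner 'for i in range(idx, len(jobs)) … else: break' loop of A; the heap is modelled by
-- its contents (heappush = append): only the popped VALUES are observable in the result.
-- fuel = js.length - idx bounds the remaining iterations.
def refillA (js : List (List Int)) (endv : Int) (fuel : Nat) (cands : List (Int × Int))
    (idx : Nat) : List (Int × Int) × Nat :=
  match fuel with
  | 0 => (cands, idx)
  | fuel + 1 =>
    if idx < js.length then
      if jobArr js idx ≤ endv then
        refillA js endv fuel (cands ++ [(jobLen js idx, jobArr js idx)]) (idx + 1)
      else (cands, idx)
    else (cands, idx)

-- A's while loop; heappop = take a minimal element under the (length, arrival) lex order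
-- (Python's list order on the pushed pairs) and remove its first occurrence.  The .getD
-- defaults are only reached where Python's heappop would raise, which never happens (the
-- 'if not cands' branch catches the empty heap exactly as Python does).  The fuel only
-- bounds the iterations (the bisimulation below shows both loops run in lockstep).
def loopA (js : List (List Int)) (fuel : Nat) (answer : Int) (cands : List (Int × Int))
    (done idx : Nat) (endv : Int) : Int :=
  match fuel with
  | 0 => answer
  | fuel + 1 =>
    if done < js.length then
      if (refillA js endv (js.length - idx) cands idx).1 = [] then
        loopA js fuel answer (refillA js endv (js.length - idx) cands idx).1 done
          (refillA js endv (js.length - idx) cands idx).2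
          (jobArr js (refillA js endv (js.length - idx) cands idx).2)
      else
        let m := (PySem.List.min2? (refillA js endv (js.length - idx) cands idx).1
          Prod.fst Prod.snd).getD (0, 0)
        loopA js fuel (answer + endv + m.1 - m.2)
          ((PySem.List.remove? (refillA js endv (js.length - idx) cands idx).1 m).getD [])
          (done + 1) (refillA js endv (js.length - idx) cands idx).2 (endv + m.1)
    else answer

def solution (jobs : List (List Int)) : Int :=
  PySem.Int.floordiv
    (loopA (PySem.List.sorted jobs (fun x => x) false)
      (3 * (PySem.List.sorted jobs (fun x => x) false).length + 1) 0 [] 0 0 0)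
    (PySem.List.sorted jobs (fun x => x) false).length

-- ===== PORT B =====
-- Python's '<=' on int pairs (lexicographic)
def pairLe (x y : Int × Int) : Bool :=
  decide (x.1 < y.1) || (decide (x.1 = y.1) && decide (x.2 ≤ y.2))

-- Source B's insort: the while loop scans the longest prefix with pending[k] <= job, i.e. k =
-- (takeWhile …).length, and pending[:k] / pending[k:] are exactly that prefix and the rest.
def insortB (job : Int × Int) (pending : List (Int × Int)) : List (Int × Int) :=
  pending.takeWhile (fun x => pairLe x job) ++ job :: pending.dropWhile (fun x => pairLe x job)

-- Source B's inner 'while i < n and jobs[i][0] <= end' refill loop; fuel = js.length - i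
def refillB (js : List (List Int)) (endv : Int) (fuel : Nat) (pend : List (Int × Int))
    (i : Nat) : List (Int × Int) × Nat :=
  match fuel with
  | 0 => (pend, i)
  | fuel + 1 =>
    if i < js.length ∧ jobArr js i ≤ endv then
      refillB js endv fuel (insortB (jobLen js i, jobArr js i) pend) (i + 1)
    else (pend, i)

-- Source B's phase-1 'while len(finishes) < n' loop: returns the finishes list; pending[0] /
-- pending[1:] are the head and tail of the ordered pending list.
def phase1B (js : List (List Int)) (fuel : Nat) (fins pend : List (Int × Int)) (i : Nat)
    (endv : Int) : List (Int × Int) :=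
  match fuel with
  | 0 => fins
  | fuel + 1 =>
    if fins.length < js.length then
      match (refillB js endv (js.length - i) pend i).1 with
      | [] => phase1B js fuel fins [] (refillB js endv (js.length - i) pend i).2
          (jobArr js (refillB js endv (js.length - i) pend i).2)
      | (l, a) :: t => phase1B js fuel (fins ++ [(endv + l, a)]) t
          (refillB js endv (js.length - i) pend i).2 (endv + l)
    else fins

-- Source B's phase-2 'for f, a in finishes: total += f - a'
def sumFinB (fins : List (Int × Int)) : Int := fins.foldl (fun t fa => t + (fa.1 - fa.2)) 0

def solution_alt (jobs : List (List Int)) : Int :=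
  PySem.Int.floordiv
    (sumFinB (phase1B (PySem.List.sorted jobs (fun x => x) false)
      (3 * (PySem.List.sorted jobs (fun x => x) false).length + 1) [] [] 0 0))
    (PySem.List.sorted jobs (fun x => x) false).length

-- ===== PRECONDITION & SPEC =====
-- Pre_ excludes exactly the inputs on which the Python A raises: an empty jobs list
-- (ZeroDivisionError at 'answer // len(jobs)') and an inner list with fewer than two
-- elements (IndexError at jobs[i][1] / jobs[i][0]); B raises on exactly those inputs too.
def Pre_solution (jobs : List (List Int)) : Prop :=
  jobs ≠ [] ∧ ∀ j ∈ jobs, 2 ≤ j.length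
instance (jobs : List (List Int)) : Decidable (Pre_solution jobs) := by
  unfold Pre_solution; infer_instance

def pvWitness_solution : List (List Int) := [[0, 3], [1, 9], [2, 6]]

def Spec_solution (jobs : List (List Int)) (out : Int) : Prop := out = solution_alt jobs
instance (jobs : List (List Int)) (out : Int) : Decidable (Spec_solution jobs out) := by
  unfold Spec_solution; infer_instance

-- ===== CLAIM (what is proved, stated in full; the proofs are below) =====
def Claim_equal_solution : Prop :=
  ∀ (jobs : List (List Int)), Dom_solution jobs → Pre_solution jobs →
    Spec_solution jobs (solution jobs)

-- ===== LEMMAS AND PROOFS =====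

-- the lex order on (length, arrival) pairs, as a Prop
def lexLeP (x y : Int × Int) : Prop := x.1 < y.1 ∨ (x.1 = y.1 ∧ x.2 ≤ y.2)

theorem lexLeP_refl (x : Int × Int) : lexLeP x x := Or.inr ⟨rfl, le_refl _⟩

theorem lexLeP_trans {x y z : Int × Int} (h1 : lexLeP x y) (h2 : lexLeP y z) : lexLeP x z := by
  unfold lexLeP at *; omega

theorem lexLeP_total (x y : Int × Int) : lexLeP x y ∨ lexLeP y x := by
  unfold lexLeP; omega

theorem lexLeP_antisymm {x y : Int × Int} (h1 : lexLeP x y) (h2 : lexLeP y x) : x = y := by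
  unfold lexLeP at *
  exact Prod.ext (by omega) (by omega)

theorem pairLe_iff (x y : Int × Int) : pairLe x y = true ↔ lexLeP x y := by
  unfold pairLe lexLeP; simp

-- min2? under the (fst, snd) keys returns a lex-minimal member
-- min2? with the (fst, snd) keys, written with this file's own step function
theorem min2?_as_foldl (xs : List (Int × Int)) :
    PySem.List.min2? xs Prod.fst Prod.snd = List.foldl
        (fun acc x => match acc with
          | none => some x
          | some m => if (decide (x.1 < m.1) || (!decide (m.1 < x.1) && decide (x.2 < m.2)))
              = true then some x else some m)
        none xs := by
  unfold PySem.List.min2?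
  apply List.foldl_ext
  intro acc x _
  cases acc <;> rfl

theorem min2?_spec (xs : List (Int × Int)) (h : xs ≠ []) :
    ∃ m, PySem.List.min2? xs Prod.fst Prod.snd = some m ∧ m ∈ xs ∧ ∀ y ∈ xs, lexLeP m y := by
  have key : ∀ (t : List (Int × Int)) (a : Int × Int),
      ∃ m, List.foldl
        (fun acc x => match acc with
          | none => some x
          | some m => if (decide (x.1 < m.1) || (!decide (m.1 < x.1) && decide (x.2 < m.2)))
              = true then some x else some m)
        (some a) t = some m ∧ (m = a ∨ m ∈ t) ∧ lexLeP m a ∧ ∀ y ∈ t, lexLeP m y := by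
    intro t
    induction t with
    | nil => intro a; exact ⟨a, rfl, Or.inl rfl, lexLeP_refl a, by simp⟩
    | cons x t ih =>
      intro a
      have hstep : ∀ (b : Int × Int), List.foldl
          (fun acc x => match acc with
            | none => some x
            | some m => if (decide (x.1 < m.1) || (!decide (m.1 < x.1) && decide (x.2 < m.2)))
                = true then some x else some m)
          (some b) (x :: t)
          = List.foldl
          (fun acc x => match acc with
            | none => some x
            | some m => if (decide (x.1 < m.1) || (!decide (m.1 < x.1) && decide (x.2 < m.2)))
                = true then some x else some m)
          (if (decide (x.1 < b.1) || (!decide (b.1 < x.1) && decide (x.2 < b.2))) = true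
            then some x else some b) t := fun b => rfl
      by_cases hc : (decide (x.1 < a.1) || (!decide (a.1 < x.1) && decide (x.2 < a.2))) = true
      · rcases ih x with ⟨m, hm, hmem, hma, hall⟩
        have hxa : lexLeP x a := by
          simp at hc; unfold lexLeP; omega
        refine ⟨m, ?_, ?_, lexLeP_trans hma hxa, ?_⟩
        · rw [hstep, if_pos hc]; exact hm
        · rcases hmem with h | h
          · exact Or.inr (by simp [h])
          · exact Or.inr (by simp [h])
        · intro y hy
          rcases List.mem_cons.mp hy with rfl | hy
          · exact hma
          · exact hall y hy
      · rcases ih a with ⟨m, hm, hmem, hma, hall⟩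
        have hax : lexLeP a x := by
          simp at hc; unfold lexLeP; omega
        refine ⟨m, ?_, ?_, hma, ?_⟩
        · rw [hstep, if_neg hc]; exact hm
        · rcases hmem with h | h
          · exact Or.inl h
          · exact Or.inr (by simp [h])
        · intro y hy
          rcases List.mem_cons.mp hy with rfl | hy
          · exact lexLeP_trans hma hax
          · exact hall y hy
  match xs, h with
  | a :: t, _ =>
    rcases key t a with ⟨m, hm, hmem, hma, hall⟩
    refine ⟨m, ?_, ?_, ?_⟩
    · rw [min2?_as_foldl]; exact hm
    · rcases hmem with rfl | h <;> simp [h]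
    · intro y hy
      rcases List.mem_cons.mp hy with rfl | hy
      · exact hma
      · exact hall y hy

-- Source B's insort: a permutation of consing, preserving sortedness
theorem insortB_perm (job : Int × Int) (p : List (Int × Int)) :
    (insortB job p).Perm (job :: p) := by
  unfold insortB
  have h := List.perm_middle (a := job) (l₁ := p.takeWhile (fun x => pairLe x job))
    (l₂ := p.dropWhile (fun x => pairLe x job))
  rwa [List.takeWhile_append_dropWhile] at h

theorem insortB_sorted (job : Int × Int) (p : List (Int × Int))
    (hp : p.Pairwise lexLeP) : (insortB job p).Pairwise lexLeP := by
  unfold insortB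
  have hsplit : p = p.takeWhile (fun x => pairLe x job) ++ p.dropWhile (fun x => pairLe x job) :=
    (List.takeWhile_append_dropWhile).symm
  rw [hsplit] at hp
  rcases List.pairwise_append.mp hp with ⟨h1, h2, h12⟩
  apply List.pairwise_append.mpr
  refine ⟨h1, ?_, ?_⟩
  · apply List.pairwise_cons.mpr
    refine ⟨?_, h2⟩
    intro y hy
    -- job ≤ every element of the dropWhile part: its head fails pairLe, tail is above head
    rcases hd : p.dropWhile (fun x => pairLe x job) with _ | ⟨h0, t0⟩
    · rw [hd] at hy; simp at hy
    · have hh0 : ¬ pairLe h0 job = true := by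
        have := List.head?_dropWhile_not (fun x => pairLe x job) p
        rw [hd] at this; simpa using this
      have hjh0 : lexLeP job h0 := by
        rcases lexLeP_total job h0 with h | h
        · exact h
        · exact absurd ((pairLe_iff h0 job).mpr h) hh0
      rw [hd] at hy
      rcases List.mem_cons.mp hy with rfl | hy
      · exact hjh0
      · rw [hd] at h2
        exact lexLeP_trans hjh0 ((List.pairwise_cons.mp h2).1 y hy)
  · intro x hx y hy
    have hxle : lexLeP x job :=
      (pairLe_iff x job).mp (List.mem_takeWhile_imp (p := fun x => pairLe x job) (l := p) hx)
    rcases List.mem_cons.mp hy with rfl | hy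
    · exact hxle
    · exact h12 x hx y hy

-- the two refill loops advance the same index and keep cands ~ pend, pend sorted
theorem refill_inv (js : List (List Int)) (endv : Int) :
    ∀ (fuel : Nat) (cands pend : List (Int × Int)) (i : Nat),
      cands.Perm pend → pend.Pairwise lexLeP →
      (refillA js endv fuel cands i).2 = (refillB js endv fuel pend i).2 ∧
      (refillA js endv fuel cands i).1.Perm (refillB js endv fuel pend i).1 ∧
      (refillB js endv fuel pend i).1.Pairwise lexLeP := by
  intro fuel
  induction fuel with
  | zero => intro cands pend i hperm hsort; exact ⟨rfl, hperm, hsort⟩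
  | succ fuel ih =>
    intro cands pend i hperm hsort
    rw [refillA, refillB]
    by_cases h1 : i < js.length
    · by_cases h2 : jobArr js i ≤ endv
      · rw [if_pos h1, if_pos h2, if_pos ⟨h1, h2⟩]
        apply ih
        · exact ((List.perm_append_singleton _ _).trans
            (hperm.cons _)).trans (insortB_perm _ _).symm
        · exact insortB_sorted _ _ hsort
      · rw [if_pos h1, if_neg h2, if_neg (fun h => h2 h.2)]
        exact ⟨rfl, hperm, hsort⟩
    · rw [if_neg h1, if_neg (fun h => h1 h.1)]
      exact ⟨rfl, hperm, hsort⟩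

-- summing the waits: the foldl shifts over its accumulator and splits over append
theorem sumFinB_shift : ∀ (xs : List (Int × Int)) (c : Int),
    xs.foldl (fun t fa => t + (fa.1 - fa.2)) c = c + sumFinB xs := by
  intro xs
  induction xs with
  | nil => intro c; simp [sumFinB]
  | cons x t ih =>
    intro c
    simp only [sumFinB, List.foldl] at *
    rw [ih (c + (x.1 - x.2)), ih (0 + (x.1 - x.2))]
    ring

theorem sumFinB_append (xs : List (Int × Int)) (x : Int × Int) :
    sumFinB (xs ++ [x]) = sumFinB xs + (x.1 - x.2) := by
  unfold sumFinB
  rw [List.foldl_append]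
  simp [sumFinB_shift]

-- the lockstep bisimulation between A's while loop and B's two phases
theorem loop_eq (js : List (List Int)) :
    ∀ (fuel : Nat) (ans : Int) (cands fins pend : List (Int × Int)) (i : Nat) (endv : Int),
      cands.Perm pend → pend.Pairwise lexLeP →
      loopA js fuel ans cands fins.length i endv
        = ans + (sumFinB (phase1B js fuel fins pend i endv) - sumFinB fins) := by
  intro fuel
  induction fuel with
  | zero => intro ans cands fins pend i endv _ _; rw [loopA, phase1B]; ring
  | succ fuel ih =>
    intro ans cands fins pend i endv hperm hsort
    rw [loopA, phase1B]
    rcases refill_inv js endv (js.length - i) cands pend i hperm hsort with ⟨hidx, hp, hs⟩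
    by_cases hdone : fins.length < js.length
    · rw [if_pos hdone, if_pos hdone]
      rcases hB : (refillB js endv (js.length - i) pend i).1 with _ | ⟨⟨l, a⟩, t⟩
      · -- both refills produce nothing: idle jump in lockstep
        have hA : (refillA js endv (js.length - i) cands i).1 = [] :=
          List.Perm.eq_nil (by rw [← hB] at *; exact hp)
        rw [if_pos hA, hA, hidx]
        exact ih ans [] fins [] _ _ (List.Perm.refl _) (by simp)
      · -- both refills non-empty: A pops the lex-min, B pops the head of the ordered list
        have hAne : (refillA js endv (js.length - i) cands i).1 ≠ [] := by
          intro h0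
          rw [h0, hB] at hp
          exact absurd hp.symm.eq_nil (by simp)
        rw [if_neg hAne]
        rcases min2?_spec _ hAne with ⟨m, hm, hmem, hmin⟩
        have hperm' : (refillA js endv (js.length - i) cands i).1.Perm ((l, a) :: t) := by
          rw [← hB]; exact hp
        have hsort' : ((l, a) :: t).Pairwise lexLeP := by rw [← hB]; exact hs
        -- the head of the ordered pending list IS the lex-min A pops
        have hhead : m = (l, a) := by
          apply lexLeP_antisymm
          · exact hmin _ (hperm'.symm.mem_iff.mp (List.mem_cons_self))
          · rcases List.mem_cons.mp (hperm'.mem_iff.mp hmem) with rfl | hmt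
            · exact lexLeP_refl _
            · exact (List.pairwise_cons.mp hsort').1 m hmt
        subst hhead
        have hrem : (PySem.List.remove? (refillA js endv (js.length - i) cands i).1 (l, a)).getD []
            = (refillA js endv (js.length - i) cands i).1.erase (l, a) := by
          rw [PySem.List.remove?_eq_some_erase _ _ hmem]; rfl
        have hperm2 : ((refillA js endv (js.length - i) cands i).1.erase (l, a)).Perm t := by
          have h2 := hperm'.erase (l, a)
          rwa [List.erase_cons_head] at h2
        have hrec := ih (ans + endv + l - a)
          ((refillA js endv (js.length - i) cands i).1.erase (l, a))
          (fins ++ [(endv + l, a)]) t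
          (refillB js endv (js.length - i) pend i).2 (endv + l)
          hperm2 (List.pairwise_cons.mp hsort').2
        rw [show (fins ++ [(endv + l, a)]).length = fins.length + 1 by simp] at hrec
        simp only [hm, Option.getD_some, hidx]
        rw [hrem, hrec, sumFinB_append]
        ring
    · rw [if_neg hdone, if_neg hdone]; ring

theorem solution_eq_alt (jobs : List (List Int)) : solution jobs = solution_alt jobs := by
  unfold solution solution_alt
  have h := loop_eq (PySem.List.sorted jobs (fun x => x) false)
    (3 * (PySem.List.sorted jobs (fun x => x) false).length + 1) 0 [] [] [] 0 0
    (List.Perm.refl _) (by simp)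
  simp only [List.length_nil] at h
  rw [h]
  simp [sumFinB]

-- ===== VERDICT (by name: the statement is the Claim_ definition above) =====
theorem solution_spec : Claim_equal_solution := by
  intro jobs _ _
  unfold Spec_solution
  exact solution_eq_alt jobs
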